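-- pv_equiv track=rewrite | github.com/mikhailantonovdigital-dev/musicmemoire-web | app/services/suno_service.py | _pick_audio_url
-- ===== SOURCE A (Python) =====
-- from typing import Any
--
-- def _pick_audio_url(tracks: list[dict[str, Any]]) -> str | None:
--     for track in tracks:
--         url = (track.get("audio_url") or "").strip()
--         if url:
--             return url
--     for track in tracks:
--         url = (track.get("stream_audio_url") or "").strip()
--         if url:
--             return url
--     return None
-- ===== SOURCE B (Python) =====
-- def _pick_audio_url(tracks):
--     first_audio = None
--     first_stream = None
--     for track in tracks:
--         if first_audio is None:
--             u = (track.get("audio_url") or "").strip()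
--             if u:
--                 first_audio = u
--         if first_stream is None:
--             s = (track.get("stream_audio_url") or "").strip()
--             if s:
--                 first_stream = s
--     return first_audio if first_audio is not None else first_stream
-- ===== Notes on version B (the rewrite author's own statement) =====
-- stated objective: alternative
-- what changed: Replaces A's two sequential early-return scans with a single exhaustive fold that threads two accumulators (first non-empty audio_url and first non-empty stream_audio_url) and combines them with audio-over-stream priority at the end.
import Mathlib
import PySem

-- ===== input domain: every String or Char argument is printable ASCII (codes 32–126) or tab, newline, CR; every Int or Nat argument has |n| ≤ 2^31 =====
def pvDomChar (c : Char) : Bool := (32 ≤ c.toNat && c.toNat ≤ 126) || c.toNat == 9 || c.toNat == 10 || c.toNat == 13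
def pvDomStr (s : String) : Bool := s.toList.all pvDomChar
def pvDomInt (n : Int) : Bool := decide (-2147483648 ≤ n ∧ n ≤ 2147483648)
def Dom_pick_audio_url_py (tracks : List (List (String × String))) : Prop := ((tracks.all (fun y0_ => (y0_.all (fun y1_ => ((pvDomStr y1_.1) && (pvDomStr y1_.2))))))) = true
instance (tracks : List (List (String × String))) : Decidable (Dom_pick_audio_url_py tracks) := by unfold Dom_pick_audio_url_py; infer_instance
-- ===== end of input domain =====

-- B replaces A's two sequential early-return scans with one exhaustive fold threading two accumulators (objective: alternative decomposition).

-- ===== PORT A =====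
-- first loop of A: return first non-empty stripped audio_url
def pickA_loop1 (tracks : List (List (String × String))) : Option String :=
  match tracks with
  | [] => none
  | track :: rest =>
      let url := PySem.Str.strip ((PySem.Dict.get? (PySem.Dict.mk track) "audio_url").getD "")
      if url ≠ "" then some url else pickA_loop1 rest

-- second loop of A: return first non-empty stripped stream_audio_url
def pickA_loop2 (tracks : List (List (String × String))) : Option String :=
  match tracks with
  | [] => none
  | track :: rest =>
      let url := PySem.Str.strip ((PySem.Dict.get? (PySem.Dict.mk track) "stream_audio_url").getD "")
      if url ≠ "" then some url else pickA_loop2 rest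

def pick_audio_url_py (tracks : List (List (String × String))) : Option String :=
  match pickA_loop1 tracks with
  | some u => some u
  | none => pickA_loop2 tracks

-- ===== PORT B =====
-- one fold step: fill each still-empty accumulator from this track
def pickB_step (acc : Option String × Option String) (track : List (String × String)) :
    Option String × Option String :=
  let firstAudio :=
    if acc.1.isNone then
      let u := PySem.Str.strip ((PySem.Dict.get? (PySem.Dict.mk track) "audio_url").getD "")
      if u ≠ "" then some u else acc.1
    else acc.1
  let firstStream :=
    if acc.2.isNone then
      let s := PySem.Str.strip ((PySem.Dict.get? (PySem.Dict.mk track) "stream_audio_url").getD "")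
      if s ≠ "" then some s else acc.2
    else acc.2
  (firstAudio, firstStream)

def pick_audio_url_py_alt (tracks : List (List (String × String))) : Option String :=
  let acc := tracks.foldl pickB_step (none, none)
  if acc.1.isSome then acc.1 else acc.2

-- ===== PRECONDITION & SPEC =====
def Spec_pick_audio_url_py (tracks : List (List (String × String))) (out : Option String) : Prop := out = pick_audio_url_py_alt tracks
instance (tracks : List (List (String × String))) (out : Option String) : Decidable (Spec_pick_audio_url_py tracks out) := by unfold Spec_pick_audio_url_py; infer_instance

-- ===== CLAIM (what is proved, stated in full; the proofs are below) =====
def Claim_equal_pick_audio_url_py : Prop := ∀ (tracks : List (List (String × String))), Dom_pick_audio_url_py tracks → Spec_pick_audio_url_py tracks (pick_audio_url_py tracks)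

-- ===== LEMMAS AND PROOFS =====

-- invariant: the fold fills each component with its accumulator, else the first hit of the corresponding scan
theorem pickB_foldl_eq (tracks : List (List (String × String))) (a s : Option String) :
    tracks.foldl pickB_step (a, s) =
      ((match a with | some x => some x | none => pickA_loop1 tracks),
       (match s with | some y => some y | none => pickA_loop2 tracks)) := by
  induction tracks generalizing a s with
  | nil => cases a <;> cases s <;> simp [pickA_loop1, pickA_loop2]
  | cons track rest ih =>
      cases a <;> cases s <;>
        simp only [List.foldl_cons, pickB_step, Option.isNone_none, Option.isNone_some,
          ite_true, ite_false, pickA_loop1, pickA_loop2, ih] <;>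
        split_ifs <;> simp_all

-- ===== VERDICT (by name: the statement is the Claim_ definition above) =====
theorem pick_audio_url_py_spec : Claim_equal_pick_audio_url_py := by
  intro tracks _
  unfold Spec_pick_audio_url_py pick_audio_url_py pick_audio_url_py_alt
  rw [pickB_foldl_eq]
  cases h : pickA_loop1 tracks <;> simp
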